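-- pv_equiv track=rewrite | github.com/bigseshum/BlissCalc | BlissCalc.py | xpToRaw
-- ===== SOURCE A (Python) =====
-- def xpToRaw(pr, xp):
--     rawxp = 0
--     i = 0
--     while i < pr:
--         rawxp += 200000000 * 2 ** i
--         i += 1
--     rawxp += xp * 2 ** pr
--     return rawxp
-- ===== SOURCE B (Python) =====
-- def xpToRaw(pr, xp):
--     # geometric-series closed form of the prestige loop
--     return 200000000 * (2 ** pr - 1) + xp * 2 ** pr
-- ===== Notes on version B (the rewrite author's own statement) =====
-- stated objective: faster
-- what changed: Replaced the O(pr) while-loop summing 200000000*2**i with the closed-form geometric series 200000000*(2**pr-1)+xp*2**pr.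
-- outside the precondition, e.g. on xpToRaw(-1, 4): A returns 2.0, B returns -99999998.0
import Mathlib
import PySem

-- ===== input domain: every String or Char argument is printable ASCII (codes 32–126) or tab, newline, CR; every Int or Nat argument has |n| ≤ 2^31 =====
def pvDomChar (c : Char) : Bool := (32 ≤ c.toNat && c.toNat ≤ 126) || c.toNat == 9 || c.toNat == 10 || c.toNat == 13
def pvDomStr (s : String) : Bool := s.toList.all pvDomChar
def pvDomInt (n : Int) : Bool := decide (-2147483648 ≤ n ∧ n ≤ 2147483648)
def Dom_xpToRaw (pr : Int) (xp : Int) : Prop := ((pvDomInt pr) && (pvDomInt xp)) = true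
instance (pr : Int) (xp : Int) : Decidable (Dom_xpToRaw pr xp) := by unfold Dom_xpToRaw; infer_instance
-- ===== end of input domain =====

-- ===== PORT A =====
-- B replaces A's O(pr) accumulation loop with the closed-form geometric series (objective: faster).
-- The while loop 'i = 0; while i < pr: rawxp += 200000000 * 2**i; i += 1' iterates over i in range(0, pr).
def xpToRaw (pr : Int) (xp : Int) : Int :=
  let rawxp : Int :=
    (PySem.List.pyRange 0 pr 1).foldl (fun rawxp i => rawxp + 200000000 * 2 ^ i.toNat) 0
  rawxp + xp * 2 ^ pr.toNat

-- ===== PORT B =====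
def xpToRaw_alt (pr : Int) (xp : Int) : Int :=
  200000000 * (2 ^ pr.toNat - 1) + xp * 2 ^ pr.toNat

-- ===== PRECONDITION & SPEC =====
-- Pre_ excludes negative pr, on which Python's 2**pr is a float, so A (and B) return a float, not an int.
def Pre_xpToRaw (pr : Int) (xp : Int) : Prop := 0 ≤ pr
instance (pr : Int) (xp : Int) : Decidable (Pre_xpToRaw pr xp) := by unfold Pre_xpToRaw; infer_instance
def pvWitness_xpToRaw : Int × Int := (3, 12345)
def Spec_xpToRaw (pr : Int) (xp : Int) (out : Int) : Prop := out = xpToRaw_alt pr xp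
instance (pr : Int) (xp : Int) (out : Int) : Decidable (Spec_xpToRaw pr xp out) := by unfold Spec_xpToRaw; infer_instance

-- ===== CLAIM (what is proved, stated in full; the proofs are below) =====
def Claim_equal_xpToRaw : Prop := ∀ (pr : Int) (xp : Int), Dom_xpToRaw pr xp → Pre_xpToRaw pr xp → Spec_xpToRaw pr xp (xpToRaw pr xp)

-- ===== LEMMAS AND PROOFS =====
-- The loop sum over range(0, n) equals the geometric-series closed form.
theorem xpToRaw_loop_sum (n : Nat) :
    (PySem.List.pyRange 0 (n : Int) 1).foldl (fun rawxp i => rawxp + 200000000 * 2 ^ i.toNat) (0 : Int)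
      = 200000000 * (2 ^ n - 1) := by
  induction n with
  | zero => simp
  | succ n ih =>
    push_cast
    rw [PySem.List.pyRange_one_succ_right (by omega : (0:Int) ≤ (n:Int))]
    rw [List.foldl_append]
    push_cast at ih
    rw [ih]
    simp only [List.foldl, Int.toNat_natCast, pow_succ]
    ring

-- ===== VERDICT (by name: the statement is the Claim_ definition above) =====
theorem xpToRaw_spec : Claim_equal_xpToRaw := by
  intro pr xp _ hpre
  unfold Spec_xpToRaw xpToRaw xpToRaw_alt
  lift pr to ℕ using hpre with n
  simp only [Int.toNat_natCast]
  rw [xpToRaw_loop_sum n]
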